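-- pv_equiv track=rewrite | github.com/adnaneh/nerf | find_pairs_outside_space.py | generate_xor_closure
-- ===== SOURCE A (Python) =====
-- def generate_xor_closure(values):
--     """Generate the XOR closure of a set of values"""
--     closure = set(values)
--     prev_size = 0
--
--     while len(closure) != prev_size:
--         prev_size = len(closure)
--         new_values = set()
--         for v1 in list(closure):
--             for v2 in list(closure):
--                 new_values.add(v1 ^ v2)
--         closure.update(new_values)
--
--     return sorted(list(closure))
-- ===== SOURCE B (Python) =====
-- def generate_xor_closure(values):
--     """Generate the XOR closure of a set of values"""
--     span = []
--     for v in values: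
--         if not span:
--             span = [0]
--         if v not in span:
--             span = span + [x ^ v for x in span]
--     return sorted(span)
-- ===== Notes on version B (the rewrite author's own statement) =====
-- stated objective: faster
-- what changed: Replaces the iterate-pairwise-XOR-until-fixpoint loop (repeatedly XORing all pairs of the growing closure) with a single pass that maintains the XOR-span: each new value not already in the span doubles it by XORing it into every element, so the closure of size 2^r is built directly.
import Mathlib
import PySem

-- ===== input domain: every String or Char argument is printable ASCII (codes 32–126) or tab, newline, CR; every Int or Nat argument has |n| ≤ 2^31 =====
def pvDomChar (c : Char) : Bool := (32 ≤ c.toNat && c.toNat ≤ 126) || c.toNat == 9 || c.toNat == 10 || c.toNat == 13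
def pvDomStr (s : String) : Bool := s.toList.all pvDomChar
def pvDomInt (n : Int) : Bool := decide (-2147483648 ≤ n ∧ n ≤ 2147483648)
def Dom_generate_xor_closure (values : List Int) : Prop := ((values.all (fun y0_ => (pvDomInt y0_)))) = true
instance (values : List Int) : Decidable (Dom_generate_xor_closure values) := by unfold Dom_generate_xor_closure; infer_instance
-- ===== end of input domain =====

-- B replaces A's iterate-all-pairwise-XORs-until-fixpoint loop by a single pass that doubles a
-- span list with each new independent value (objective: faster, measured in a timing run).

-- ===== PORT A =====
-- Helper lemmas needed by port A's termination proof (the while loop terminates because the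
-- closure is a nodup list that strictly grows, bounded by the finite list pvSpanCap values).

-- normal forms of Python's infinite-two's-complement xor (PySem.Int.bxor) on the two sign shapes
theorem pv_bxor_nn (x y : Nat) : PySem.Int.bxor (x : Int) (y : Int) = ((x ^^^ y : Nat) : Int) := by
  simp [PySem.Int.bxor]
theorem pv_bxor_np (x y : Nat) : PySem.Int.bxor (x : Int) (-(y : Int) - 1) = -((x ^^^ y : Nat) : Int) - 1 := by
  rw [PySem.Int.bxor, if_pos (by omega), if_neg (by omega),
    show (-(-(y:Int)-1)-1) = (y:Int) by ring, Int.toNat_natCast, Int.toNat_natCast]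
theorem pv_bxor_pn (x y : Nat) : PySem.Int.bxor (-(x : Int) - 1) (y : Int) = -((x ^^^ y : Nat) : Int) - 1 := by
  rw [PySem.Int.bxor, if_neg (by omega), if_pos (by omega),
    show (-(-(x:Int)-1)-1) = (x:Int) by ring, Int.toNat_natCast, Int.toNat_natCast]
theorem pv_bxor_pp (x y : Nat) : PySem.Int.bxor (-(x : Int) - 1) (-(y : Int) - 1) = ((x ^^^ y : Nat) : Int) := by
  rw [PySem.Int.bxor, if_neg (by omega), if_neg (by omega),
    show (-(-(x:Int)-1)-1) = (x:Int) by ring, show (-(-(y:Int)-1)-1) = (y:Int) by ring,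
    Int.toNat_natCast, Int.toNat_natCast]

theorem pv_int_rep (a : Int) : ∃ m : Nat, a = (m : Int) ∨ a = -(m : Int) - 1 := by
  rcases a with m | m
  · exact ⟨m, Or.inl rfl⟩
  · exact ⟨m, Or.inr (by simp [Int.negSucc_eq]; ring)⟩

theorem pv_bxor_assoc (a b c : Int) :
    PySem.Int.bxor (PySem.Int.bxor a b) c = PySem.Int.bxor a (PySem.Int.bxor b c) := by
  obtain ⟨x, hx | hx⟩ := pv_int_rep a <;> obtain ⟨y, hy | hy⟩ := pv_int_rep b <;>
    obtain ⟨z, hz | hz⟩ := pv_int_rep c <;> subst hx hy hz <;>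
    simp only [pv_bxor_nn, pv_bxor_np, pv_bxor_pn, pv_bxor_pp, Nat.xor_assoc]

theorem pv_zero_bxor (a : Int) : PySem.Int.bxor 0 a = a := by
  rw [PySem.Int.bxor_comm, PySem.Int.bxor_zero]

theorem pv_bxor_swap (a v b : Int) :
    PySem.Int.bxor (PySem.Int.bxor a v) b = PySem.Int.bxor (PySem.Int.bxor a b) v := by
  rw [pv_bxor_assoc, pv_bxor_assoc, PySem.Int.bxor_comm v b]

theorem pv_bxor_cancel_both (a b v : Int) :
    PySem.Int.bxor (PySem.Int.bxor a v) (PySem.Int.bxor b v) = PySem.Int.bxor a b := by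
  rw [pv_bxor_assoc, PySem.Int.bxor_comm b v, ← pv_bxor_assoc v v b,
    PySem.Int.bxor_self, pv_zero_bxor]

-- a finite list covering every value the closure can ever contain (the xor-span of values)
def pvSpanCap : List Int → List Int
  | [] => [0]
  | v :: vs => pvSpanCap vs ++ (pvSpanCap vs).map (fun x => PySem.Int.bxor x v)

theorem pv_cap_zero (vs : List Int) : (0 : Int) ∈ pvSpanCap vs := by
  induction vs with
  | nil => simp [pvSpanCap]
  | cons v vs ih => simp [pvSpanCap]; exact Or.inl ih

theorem pv_cap_mem (vs : List Int) : ∀ v ∈ vs, v ∈ pvSpanCap vs := by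
  induction vs with
  | nil => simp
  | cons w vs ih =>
    intro v hv
    rcases List.mem_cons.mp hv with rfl | hv
    · exact List.mem_append_right _ (List.mem_map.mpr ⟨0, pv_cap_zero vs, pv_zero_bxor v⟩)
    · exact List.mem_append_left _ (ih v hv)

theorem pv_cap_closed (vs : List Int) :
    ∀ a ∈ pvSpanCap vs, ∀ b ∈ pvSpanCap vs, PySem.Int.bxor a b ∈ pvSpanCap vs := by
  induction vs with
  | nil =>
    intro a ha b hb
    simp [pvSpanCap] at ha hb ⊢
    subst ha; subst hb; rw [PySem.Int.bxor_self]
  | cons v vs ih =>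
    intro a ha b hb
    rcases List.mem_append.mp ha with ha | ha <;> rcases List.mem_append.mp hb with hb | hb
    · exact List.mem_append_left _ (ih a ha b hb)
    · obtain ⟨b', hb', rfl⟩ := List.mem_map.mp hb
      refine List.mem_append_right _ (List.mem_map.mpr ⟨PySem.Int.bxor a b', ih a ha b' hb', ?_⟩)
      rw [← pv_bxor_assoc]
    · obtain ⟨a', ha', rfl⟩ := List.mem_map.mp ha
      refine List.mem_append_right _ (List.mem_map.mpr ⟨PySem.Int.bxor a' b, ih a' ha' b hb, ?_⟩)
      rw [pv_bxor_swap]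
    · obtain ⟨a', ha', rfl⟩ := List.mem_map.mp ha
      obtain ⟨b', hb', rfl⟩ := List.mem_map.mp hb
      rw [pv_bxor_cancel_both]
      exact List.mem_append_left _ (ih a' ha' b' hb')

theorem pv_nodup_length_le {l l' : List Int} (h : l.Nodup) (hs : ∀ x ∈ l, x ∈ l') :
    l.length ≤ l'.length := by
  classical
  calc l.length = l.toFinset.card := (List.toFinset_card_of_nodup h).symm
  _ ≤ l'.toFinset.card := Finset.card_le_card (by intro a ha; simp at ha ⊢; exact hs a ha)
  _ ≤ l'.length := l'.toFinset_card_le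

theorem pv_prefix_update {α : Type} [BEq α] (s : PySem.Set α) (xs : List α) :
    s <+: PySem.Set.update s xs := by
  induction xs generalizing s with
  | nil => exact List.prefix_refl s
  | cons x xs ih =>
    refine List.IsPrefix.trans ?_ (ih (PySem.Set.add s x))
    unfold PySem.Set.add
    split
    · exact List.prefix_refl s
    · exact ⟨[x], rfl⟩

-- generic membership of a foldl of Set.add
theorem pv_mem_foldl_add {β : Type} (l : List β) (f : β → Int) (s : PySem.Set Int) (x : Int) :
    x ∈ l.foldl (fun nv v => PySem.Set.add nv (f v)) s ↔ x ∈ s ∨ ∃ v ∈ l, x = f v := by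
  induction l generalizing s with
  | nil => simp
  | cons v l ih =>
    simp only [List.foldl_cons, ih, PySem.Set.mem_add]
    constructor
    · rintro ((h | rfl) | ⟨w, hw, rfl⟩)
      · exact Or.inl h
      · exact Or.inr ⟨v, List.mem_cons_self, rfl⟩
      · exact Or.inr ⟨w, List.mem_cons_of_mem _ hw, rfl⟩
    · rintro (h | ⟨w, hw, rfl⟩)
      · exact Or.inl (Or.inl h)
      · rcases List.mem_cons.mp hw with rfl | hw
        · exact Or.inl (Or.inr rfl)
        · exact Or.inr ⟨w, hw, rfl⟩

-- the set new_values built by A's two nested for-loops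
def pvPairsA (closure : PySem.Set Int) : PySem.Set Int :=
  closure.foldl (fun nv v1 =>
    closure.foldl (fun nv v2 => PySem.Set.add nv (PySem.Int.bxor v1 v2)) nv)
    PySem.Set.empty

theorem pv_mem_pairsA (closure : PySem.Set Int) (x : Int) :
    x ∈ pvPairsA closure ↔ ∃ a ∈ closure, ∃ b ∈ closure, x = PySem.Int.bxor a b := by
  unfold pvPairsA
  have gen : ∀ (l : List Int) (s : PySem.Set Int),
      x ∈ l.foldl (fun nv v1 =>
        closure.foldl (fun nv v2 => PySem.Set.add nv (PySem.Int.bxor v1 v2)) nv) s ↔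
      x ∈ s ∨ ∃ a ∈ l, ∃ b ∈ closure, x = PySem.Int.bxor a b := by
    intro l
    induction l with
    | nil => simp
    | cons v l ih =>
      intro s
      simp only [List.foldl_cons, ih, pv_mem_foldl_add]
      constructor
      · rintro ((h | ⟨b, hb, rfl⟩) | ⟨a, ha, b, hb, rfl⟩)
        · exact Or.inl h
        · exact Or.inr ⟨v, List.mem_cons_self, b, hb, rfl⟩
        · exact Or.inr ⟨a, List.mem_cons_of_mem _ ha, b, hb, rfl⟩
      · rintro (h | ⟨a, ha, b, hb, rfl⟩)
        · exact Or.inl (Or.inl h)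
        · rcases List.mem_cons.mp ha with rfl | ha
          · exact Or.inl (Or.inr ⟨b, hb, rfl⟩)
          · exact Or.inr ⟨a, ha, b, hb, rfl⟩
  rw [gen]
  simp [PySem.Set.empty]

theorem pv_loop_inv (values : List Int) (closure : PySem.Set Int)
    (h : closure.Nodup ∧ (∀ x ∈ closure, x ∈ pvSpanCap values)) :
    (PySem.Set.update closure (pvPairsA closure)).Nodup ∧
      (∀ x ∈ PySem.Set.update closure (pvPairsA closure), x ∈ pvSpanCap values) := by
  refine ⟨PySem.Set.nodup_update _ _ h.1, ?_⟩
  intro x hx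
  rcases (PySem.Set.mem_update _ _ x).mp hx with hx | hx
  · exact h.2 x hx
  · obtain ⟨a, ha, b, hb, rfl⟩ := (pv_mem_pairsA closure x).mp hx
    exact pv_cap_closed values a (h.2 a ha) b (h.2 b hb)

-- the while loop of A: runs while len(closure) != prev_size
def pvLoopA (values : List Int) (closure : PySem.Set Int) (prev : Nat)
    (h : closure.Nodup ∧ (∀ x ∈ closure, x ∈ pvSpanCap values) ∧ prev ≤ closure.length) :
    PySem.Set Int :=
  if hne : closure.length ≠ prev then
    pvLoopA values (PySem.Set.update closure (pvPairsA closure)) closure.length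
      ⟨(pv_loop_inv values closure ⟨h.1, h.2.1⟩).1,
       (pv_loop_inv values closure ⟨h.1, h.2.1⟩).2,
       (pv_prefix_update closure (pvPairsA closure)).length_le⟩
  else closure
termination_by (pvSpanCap values).length + 1 - prev
decreasing_by
  have h1 : prev < closure.length := lt_of_le_of_ne h.2.2 (Ne.symm hne)
  have h2 : closure.length ≤ (pvSpanCap values).length := pv_nodup_length_le h.1 h.2.1
  omega

def generate_xor_closure (values : List Int) : List Int :=
  PySem.List.sorted
    (pvLoopA values (PySem.Set.ofList values) 0
      ⟨PySem.Set.nodup_ofList values,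
       fun x hx => pv_cap_mem values x ((PySem.Set.mem_ofList values x).mp hx),
       Nat.zero_le _⟩)
    (fun x => x) false

-- ===== PORT B =====
def generate_xor_closure_alt (values : List Int) : List Int :=
  PySem.List.sorted
    (values.foldl (fun span v =>
      let span := if span.isEmpty then [(0 : Int)] else span
      if v ∈ span then span else span ++ span.map (fun x => PySem.Int.bxor x v)) [])
    (fun x => x) false

-- ===== PRECONDITION & SPEC =====
def Spec_generate_xor_closure (values : List Int) (out : List Int) : Prop := out = generate_xor_closure_alt values
instance (values : List Int) (out : List Int) : Decidable (Spec_generate_xor_closure values out) := by unfold Spec_generate_xor_closure; infer_instance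

-- ===== CLAIM (what is proved, stated in full; the proofs are below) =====
def Claim_equal_generate_xor_closure : Prop := ∀ (values : List Int), Dom_generate_xor_closure values → Spec_generate_xor_closure values (generate_xor_closure values)

-- ===== LEMMAS AND PROOFS =====

theorem pv_bxor_cancel (a v : Int) : PySem.Int.bxor (PySem.Int.bxor a v) v = a := by
  rw [pv_bxor_assoc, PySem.Int.bxor_self, PySem.Int.bxor_zero]

-- the xor-span of a list of values, as an inductive predicate
inductive PvInSpan (vs : List Int) : Int → Prop
  | zero : PvInSpan vs 0
  | mem {v : Int} : v ∈ vs → PvInSpan vs v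
  | xor {a b : Int} : PvInSpan vs a → PvInSpan vs b → PvInSpan vs (PySem.Int.bxor a b)

theorem pv_inspan_mono {p l : List Int} {x : Int} (h : PvInSpan p x) : PvInSpan (p ++ l) x := by
  induction h with
  | zero => exact PvInSpan.zero
  | mem hv => exact PvInSpan.mem (List.mem_append_left _ hv)
  | xor _ _ iha ihb => exact PvInSpan.xor iha ihb

theorem pv_loopA_grow (values : List Int) (closure : PySem.Set Int) (prev : Nat) (h) :
    ∀ x ∈ closure, x ∈ pvLoopA values closure prev h := by
  fun_induction pvLoopA with
  | case1 closure prev h hne ih =>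
    intro x hx
    exact ih x ((PySem.Set.mem_update _ _ x).mpr (Or.inl hx))
  | case2 => intro x hx; exact hx

theorem pv_loopA_sub (values : List Int) (closure : PySem.Set Int) (prev : Nat) (h)
    (hin : ∀ x ∈ closure, PvInSpan values x) :
    ∀ x ∈ pvLoopA values closure prev h, PvInSpan values x := by
  fun_induction pvLoopA with
  | case1 closure prev h hne ih =>
    refine ih ?_
    intro x hx
    rcases (PySem.Set.mem_update _ _ x).mp hx with hx | hx
    · exact hin x hx
    · obtain ⟨a, ha, b, hb, rfl⟩ := (pv_mem_pairsA closure x).mp hx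
      exact PvInSpan.xor (hin a ha) (hin b hb)
  | case2 closure prev h hne => exact hin

theorem pv_loopA_nodup (values : List Int) (closure : PySem.Set Int) (prev : Nat) (h) :
    (pvLoopA values closure prev h).Nodup := by
  fun_induction pvLoopA with
  | case1 closure prev h hne ih => exact ih
  | case2 closure prev h hne => exact h.1

theorem pv_loopA_closed (values : List Int) (closure : PySem.Set Int) (prev : Nat) (h)
    (hcl : closure.length = prev →
      ∀ a ∈ closure, ∀ b ∈ closure, PySem.Int.bxor a b ∈ closure) :
    ∀ a ∈ pvLoopA values closure prev h, ∀ b ∈ pvLoopA values closure prev h,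
      PySem.Int.bxor a b ∈ pvLoopA values closure prev h := by
  fun_induction pvLoopA with
  | case1 closure prev h hne ih =>
    refine ih ?_
    intro hlen a ha b hb
    -- the update added nothing: it is a prefix extension of equal length, hence equal
    have hupd : PySem.Set.update closure (pvPairsA closure) = closure :=
      ((pv_prefix_update closure (pvPairsA closure)).eq_of_length_le (le_of_eq hlen)).symm
    rw [hupd] at ha hb ⊢
    rw [← hupd]
    exact (PySem.Set.mem_update _ _ _).mpr (Or.inr ((pv_mem_pairsA closure _).mpr ⟨a, ha, b, hb, rfl⟩))
  | case2 closure prev h hne =>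
    exact hcl (by omega)

-- B's fold step and its invariant
def pvStepB (span : List Int) (v : Int) : List Int :=
  let span := if span.isEmpty then [(0 : Int)] else span
  if v ∈ span then span else span ++ span.map (fun x => PySem.Int.bxor x v)

def pvInvB (p span : List Int) : Prop :=
  (span = [] ∧ p = []) ∨
    (span.Nodup ∧ (0 : Int) ∈ span ∧ (∀ v ∈ p, v ∈ span) ∧
      (∀ a ∈ span, ∀ b ∈ span, PySem.Int.bxor a b ∈ span) ∧
      (∀ x ∈ span, PvInSpan p x))

theorem pv_stepB_inv (p span : List Int) (v : Int) (h : pvInvB p span) :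
    pvInvB (p ++ [v]) (pvStepB span v) := by
  rcases h with ⟨rfl, rfl⟩ | ⟨hnd, h0, hp, hcl, hsp⟩
  · unfold pvStepB
    simp only [List.isEmpty_nil, if_true, pv_zero_bxor, List.map, List.nil_append]
    by_cases hv : v ∈ [(0 : Int)]
    · simp only [List.mem_singleton] at hv
      subst hv
      rw [if_pos (by simp)]
      refine Or.inr ⟨List.nodup_singleton 0, List.mem_singleton_self 0, ?_, ?_, ?_⟩
      · intro w hw; simp at hw; simp [hw]
      · intro a ha b hb; simp at ha hb; subst ha; subst hb
        simp [PySem.Int.bxor_self]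
      · intro x hx; simp at hx; subst hx; exact PvInSpan.zero
    · simp only [List.mem_singleton] at hv
      rw [if_neg (by simp [hv])]
      refine Or.inr ⟨by simp [Ne.symm hv], by simp, ?_, ?_, ?_⟩
      · intro w hw; simp at hw; simp [hw]
      · intro a ha b hb
        simp only [List.cons_append, List.nil_append, List.mem_cons,
          List.not_mem_nil, or_false] at ha hb ⊢
        rcases ha with rfl | rfl <;> rcases hb with rfl | rfl <;>
          simp [PySem.Int.bxor_self, PySem.Int.bxor_zero, pv_zero_bxor]
      · intro x hx
        simp only [List.cons_append, List.nil_append, List.mem_cons,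
          List.not_mem_nil, or_false] at hx
        rcases hx with rfl | rfl
        · exact PvInSpan.zero
        · exact PvInSpan.mem (by simp)
  · have hne : span.isEmpty = false := by
      cases span with
      | nil => exact absurd h0 (List.not_mem_nil)
      | cons a l => rfl
    unfold pvStepB
    rw [hne]
    simp only [Bool.false_eq_true, if_false]
    by_cases hv : v ∈ span
    · rw [if_pos hv]
      refine Or.inr ⟨hnd, h0, ?_, hcl, fun x hx => pv_inspan_mono (hsp x hx)⟩
      intro w hw
      rcases List.mem_append.mp hw with hw | hw
      · exact hp w hw
      · simp only [List.mem_singleton] at hw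
        exact hw ▸ hv
    · rw [if_neg hv]
      have hrecov : ∀ x ∈ span, PySem.Int.bxor x v ∉ span := by
        intro x hx hmem
        refine hv ?_
        have := hcl x hx _ hmem
        rwa [← pv_bxor_assoc, PySem.Int.bxor_self, pv_zero_bxor] at this
      have hinj : Function.Injective (fun x => PySem.Int.bxor x v) := by
        intro a b hab
        have : PySem.Int.bxor (PySem.Int.bxor a v) v = PySem.Int.bxor (PySem.Int.bxor b v) v := by
          simp only at hab; rw [hab]
        rwa [pv_bxor_cancel, pv_bxor_cancel] at this
      refine Or.inr ⟨?_, List.mem_append_left _ h0, ?_, ?_, ?_⟩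
      · refine List.Nodup.append hnd (hnd.map hinj) ?_
        intro x hx hx'
        obtain ⟨y, hy, rfl⟩ := List.mem_map.mp hx'
        exact hrecov y hy hx
      · intro w hw
        rcases List.mem_append.mp hw with hw | hw
        · exact List.mem_append_left _ (hp w hw)
        · simp only [List.mem_singleton] at hw
          exact List.mem_append_right _
            (List.mem_map.mpr ⟨0, h0, by rw [pv_zero_bxor]; exact hw.symm⟩)
      · intro a ha b hb
        rcases List.mem_append.mp ha with ha | ha <;> rcases List.mem_append.mp hb with hb | hb
        · exact List.mem_append_left _ (hcl a ha b hb)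
        · obtain ⟨b', hb', rfl⟩ := List.mem_map.mp hb
          refine List.mem_append_right _ (List.mem_map.mpr ⟨PySem.Int.bxor a b', hcl a ha b' hb', ?_⟩)
          simp only [← pv_bxor_assoc]
        · obtain ⟨a', ha', rfl⟩ := List.mem_map.mp ha
          refine List.mem_append_right _ (List.mem_map.mpr ⟨PySem.Int.bxor a' b, hcl a' ha' b hb, ?_⟩)
          simp only [pv_bxor_swap]
        · obtain ⟨a', ha', rfl⟩ := List.mem_map.mp ha
          obtain ⟨b', hb', rfl⟩ := List.mem_map.mp hb
          rw [pv_bxor_cancel_both]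
          exact List.mem_append_left _ (hcl a' ha' b' hb')
      · intro x hx
        rcases List.mem_append.mp hx with hx | hx
        · exact pv_inspan_mono (hsp x hx)
        · obtain ⟨y, hy, rfl⟩ := List.mem_map.mp hx
          exact PvInSpan.xor (pv_inspan_mono (hsp y hy)) (PvInSpan.mem (by simp))

theorem pv_foldB_inv (l : List Int) : ∀ (p span : List Int), pvInvB p span →
    pvInvB (p ++ l) (l.foldl pvStepB span) := by
  induction l with
  | nil => intro p span h; simpa using h
  | cons v l ih =>
    intro p span h
    have := ih (p ++ [v]) (pvStepB span v) (pv_stepB_inv p span v h)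
    simpa using this

-- ===== VERDICT (by name: the statement is the Claim_ definition above) =====
theorem generate_xor_closure_spec : Claim_equal_generate_xor_closure := by
  intro values _hdom
  unfold Spec_generate_xor_closure generate_xor_closure generate_xor_closure_alt
  rcases values with _ | ⟨w, vs⟩
  · rw [pvLoopA]; rfl
  · set values := w :: vs with hvals
    set SA := pvLoopA values (PySem.Set.ofList values) 0
      ⟨PySem.Set.nodup_ofList values,
       fun x hx => pv_cap_mem values x ((PySem.Set.mem_ofList values x).mp hx),
       Nat.zero_le _⟩ with hSA
    have hfold : (values.foldl (fun span v =>
        let span := if span.isEmpty then [(0 : Int)] else span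
        if v ∈ span then span else span ++ span.map (fun x => PySem.Int.bxor x v)) []) =
        values.foldl pvStepB [] := rfl
    rw [hfold]
    set SB := values.foldl pvStepB [] with hSB
    -- B's invariant (the initial accumulator [] with processed prefix [] satisfies it)
    have hInv : pvInvB values SB := by
      have := pv_foldB_inv values [] [] (Or.inl ⟨rfl, rfl⟩)
      simpa [hSB] using this
    have hBinv : SB.Nodup ∧ (0 : Int) ∈ SB ∧ (∀ v ∈ values, v ∈ SB) ∧
        (∀ a ∈ SB, ∀ b ∈ SB, PySem.Int.bxor a b ∈ SB) ∧ (∀ x ∈ SB, PvInSpan values x) := by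
      rcases hInv with ⟨_, habs⟩ | h
      · exact absurd habs (by simp [hvals])
      · exact h
    -- A's closure properties
    have hAclosed : ∀ a ∈ SA, ∀ b ∈ SA, PySem.Int.bxor a b ∈ SA := by
      refine pv_loopA_closed values _ 0 _ ?_
      intro hlen
      rw [List.length_eq_zero_iff] at hlen
      rw [hlen]
      intro a ha; exact absurd ha (List.not_mem_nil)
    have hAvals : ∀ v ∈ values, v ∈ SA := by
      intro v hv
      exact pv_loopA_grow values _ 0 _ v ((PySem.Set.mem_ofList values v).mpr hv)
    have hAmem : ∀ x : Int, x ∈ SA ↔ PvInSpan values x := by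
      intro x
      constructor
      · exact pv_loopA_sub values _ 0 _
          (fun y hy => PvInSpan.mem ((PySem.Set.mem_ofList values y).mp hy)) x
      · intro hx
        induction hx with
        | zero =>
          have hw : w ∈ SA := hAvals w (by simp [hvals])
          have := hAclosed w hw w hw
          rwa [PySem.Int.bxor_self] at this
        | mem hv => exact hAvals _ hv
        | xor _ _ iha ihb => exact hAclosed _ iha _ ihb
    have hBmem : ∀ x : Int, x ∈ SB ↔ PvInSpan values x := by
      intro x
      constructor
      · exact hBinv.2.2.2.2 x
      · intro hx
        induction hx with
        | zero => exact hBinv.2.1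
        | mem hv => exact hBinv.2.2.1 _ hv
        | xor _ _ iha ihb => exact hBinv.2.2.2.1 _ iha _ ihb
    have hperm : SA.Perm SB := by
      rw [List.perm_ext_iff_of_nodup (pv_loopA_nodup values _ 0 _) hBinv.1]
      intro a
      rw [hAmem a, hBmem a]
    exact PySem.List.sorted_eq_sorted_of_perm SA SB (fun x => x) (fun a b h => h) hperm
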